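-- pv_equiv track=rewrite | github.com/keemgdeok/Algorithm | 프로그래머스/2/340212. ［PCCP 기출문제］ 2번 ／ 퍼즐 게임 챌린지/［PCCP 기출문제］ 2번 ／ 퍼즐 게임 챌린지.py | spend_time
-- ===== SOURCE A (Python) =====
-- def spend_time(diffs, times, level):
--     cost = 0
--     n = len(diffs)
--     for i in range(n):
--         if diffs[i] <= level:
--             cost += times[i]
--         else:
--             cost += (times[i-1]+times[i]) * (diffs[i]-level)  + times[i]
--
--     return cost
-- ===== SOURCE B (Python) =====
-- def spend_time(diffs, times, level):
--     n = len(diffs)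
--     total = sum(times[:n])
--     pairs = sorted(((diffs[i], times[i - 1] + times[i]) for i in range(n)),
--                    key=lambda p: p[0])
--     # walk the puzzles from hardest to easiest; stop at the first easy one
--     for d, w in reversed(pairs):
--         if d <= level:
--             break
--         total += w * (d - level)
--     return total
-- ===== Notes on version B (the rewrite author's own statement) =====
-- stated objective: alternative
-- what changed: B sorts (difficulty, weight) pairs by difficulty and accumulates penalties walking the sorted list from hardest down with an early break at the first puzzle at or below level, instead of A's single index loop branching per element.
import Mathlib
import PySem

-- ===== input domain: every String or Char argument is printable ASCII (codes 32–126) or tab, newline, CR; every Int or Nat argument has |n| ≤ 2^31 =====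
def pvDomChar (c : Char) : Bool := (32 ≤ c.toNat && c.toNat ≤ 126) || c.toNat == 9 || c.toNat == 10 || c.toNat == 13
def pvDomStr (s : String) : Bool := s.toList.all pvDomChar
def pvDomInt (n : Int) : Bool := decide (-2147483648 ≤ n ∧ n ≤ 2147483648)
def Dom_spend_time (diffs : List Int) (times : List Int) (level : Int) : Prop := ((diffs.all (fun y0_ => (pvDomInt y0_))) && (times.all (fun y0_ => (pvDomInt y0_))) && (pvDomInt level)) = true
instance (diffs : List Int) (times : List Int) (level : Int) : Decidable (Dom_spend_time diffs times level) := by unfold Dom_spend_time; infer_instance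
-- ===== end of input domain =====

-- B sorts (difficulty, weight) pairs and adds penalties from hardest down with an early break (objective: alternative algorithm, same result).

-- ===== PORT A =====
def spend_time (diffs : List Int) (times : List Int) (level : Int) : Int :=
  (PySem.List.pyRange 0 (diffs.length : Int) 1).foldl (fun cost i =>
    if (PySem.List.pyGet? diffs i).getD 0 ≤ level then
      cost + (PySem.List.pyGet? times i).getD 0
    else
      cost + ((PySem.List.pyGet? times (i - 1)).getD 0 + (PySem.List.pyGet? times i).getD 0)
               * ((PySem.List.pyGet? diffs i).getD 0 - level)
           + (PySem.List.pyGet? times i).getD 0) 0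

-- ===== PORT B =====
-- B's loop over reversed(pairs) with `break` on the first d ≤ level
def pvPenaltyLoop (level : Int) : List (Int × Int) → Int → Int
  | [], total => total
  | (d, w) :: rest, total =>
      if d ≤ level then total
      else pvPenaltyLoop level rest (total + w * (d - level))

def spend_time_alt (diffs : List Int) (times : List Int) (level : Int) : Int :=
  let n : Int := (diffs.length : Int)
  let total : Int := (PySem.List.slice times none (some n)).sum
  let pairs : List (Int × Int) :=
    PySem.List.sorted
      ((PySem.List.pyRange 0 n 1).map (fun i =>
        ((PySem.List.pyGet? diffs i).getD 0,
         (PySem.List.pyGet? times (i - 1)).getD 0 + (PySem.List.pyGet? times i).getD 0)))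
      (fun p => p.1) false
  pvPenaltyLoop level pairs.reverse total

-- ===== PRECONDITION & SPEC =====
-- Python A raises IndexError (times[i] with i < len(diffs)) exactly when times is shorter than diffs.
def Pre_spend_time (diffs : List Int) (times : List Int) (level : Int) : Prop :=
  diffs.length ≤ times.length
instance (diffs : List Int) (times : List Int) (level : Int) : Decidable (Pre_spend_time diffs times level) := by unfold Pre_spend_time; infer_instance
def pvWitness_spend_time : List Int × List Int × Int := ([3, 1], [5, 2], 2)

def Spec_spend_time (diffs : List Int) (times : List Int) (level : Int) (out : Int) : Prop := out = spend_time_alt diffs times level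
instance (diffs : List Int) (times : List Int) (level : Int) (out : Int) : Decidable (Spec_spend_time diffs times level out) := by unfold Spec_spend_time; infer_instance

-- ===== CLAIM =====
def Claim_equal_spend_time : Prop := ∀ (diffs : List Int) (times : List Int) (level : Int), Dom_spend_time diffs times level → Pre_spend_time diffs times level → Spec_spend_time diffs times level (spend_time diffs times level)

-- ===== LEMMAS AND PROOFS =====

-- A's branched fold, characterised as base sum + filtered penalty sum over the index range.
theorem spend_time_key (diffs times : List Int) (level : Int) :
    ∀ (n : Nat), n ≤ diffs.length → n ≤ times.length → ∀ (c : Int),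
      (PySem.List.pyRange 0 (n : Int) 1).foldl (fun cost i =>
        if (PySem.List.pyGet? diffs i).getD 0 ≤ level then
          cost + (PySem.List.pyGet? times i).getD 0
        else
          cost + ((PySem.List.pyGet? times (i - 1)).getD 0 + (PySem.List.pyGet? times i).getD 0)
                   * ((PySem.List.pyGet? diffs i).getD 0 - level)
               + (PySem.List.pyGet? times i).getD 0) c
      = c + (times.take n).sum
          + (((PySem.List.pyRange 0 (n : Int) 1).filter
                (fun i => level < (PySem.List.pyGet? diffs i).getD 0)).map
              (fun i => ((PySem.List.pyGet? times (i - 1)).getD 0 + (PySem.List.pyGet? times i).getD 0)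
                          * ((PySem.List.pyGet? diffs i).getD 0 - level))).sum := by
  intro n
  induction n with
  | zero =>
      intro _ _ c
      simp [PySem.List.pyRange_one_eq_nil]
  | succ m ih =>
      intro hd ht c
      have hsplit : PySem.List.pyRange 0 ((m + 1 : Nat) : Int) 1
          = PySem.List.pyRange 0 (m : Int) 1 ++ [(m : Int)] := by
        have := PySem.List.pyRange_one_succ_right (a := 0) (b := (m : Int)) (by positivity)
        push_cast
        rw [this]
      have hm : m < times.length := lt_of_lt_of_le (Nat.lt_succ_self m) ht
      have hmd : m < diffs.length := lt_of_lt_of_le (Nat.lt_succ_self m) hd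
      have htake : (times.take (m + 1)).sum = (times.take m).sum + times[m] :=
        List.sum_take_succ times m hm
      have hget : (PySem.List.pyGet? times (m : Int)).getD 0 = times[m] := by
        simp [PySem.List.pyGet?_natCast, List.getElem?_eq_getElem hm]
      rw [hsplit, List.foldl_append, List.filter_append, List.map_append, List.sum_append,
        ih (le_of_lt hmd) (le_of_lt hm)]
      by_cases h : (PySem.List.pyGet? diffs (m : Int)).getD 0 ≤ level
      · have hfil : (List.filter (fun i => decide (level < (PySem.List.pyGet? diffs i).getD 0))
            [(m : Int)]) = [] := by
          simp only [List.filter_cons, List.filter_nil]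
          rw [if_neg (by simpa using not_lt.mpr h)]
        rw [List.foldl_cons, List.foldl_nil, if_pos h, hget, hfil, htake]
        simp only [List.map_nil, List.sum_nil]
        ring
      · have hlt : level < (PySem.List.pyGet? diffs (m : Int)).getD 0 := lt_of_not_ge h
        have hfil : (List.filter (fun i => decide (level < (PySem.List.pyGet? diffs i).getD 0))
            [(m : Int)]) = [(m : Int)] := by
          simp only [List.filter_cons, List.filter_nil]
          rw [if_pos (by simpa using hlt)]
        rw [List.foldl_cons, List.foldl_nil, if_neg h, hfil, htake]
        simp only [List.map_cons, List.map_nil, List.sum_cons, List.sum_nil]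
        rw [hget]
        ring

-- On a list whose first components are non-increasing, the break-loop sums exactly the hard pairs.
theorem pvPenaltyLoop_eq_filter_sum (level : Int) :
    ∀ (l : List (Int × Int)), l.Pairwise (fun a b => b.1 ≤ a.1) → ∀ (total : Int),
      pvPenaltyLoop level l total
        = total + ((l.filter (fun p => level < p.1)).map (fun p => p.2 * (p.1 - level))).sum := by
  intro l
  induction l with
  | nil => intro _ total; simp [pvPenaltyLoop]
  | cons hd tl ih =>
      intro hpw total
      obtain ⟨hrel, htl⟩ := List.pairwise_cons.mp hpw
      obtain ⟨d, w⟩ := hd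
      by_cases h : d ≤ level
      · have hfil : ((d, w) :: tl).filter (fun p => decide (level < p.1)) = [] := by
          rw [List.filter_eq_nil_iff]
          intro p hp
          rcases List.mem_cons.mp hp with rfl | hp
          · simpa using not_lt.mpr h
          · exact by simpa using not_lt.mpr (le_trans (hrel p hp) h)
        simp only [pvPenaltyLoop, if_pos h, hfil, List.map_nil, List.sum_nil, add_zero]
      · have hlt : level < d := lt_of_not_ge h
        simp only [pvPenaltyLoop, if_neg h]
        rw [ih htl]
        have hfil : ((d, w) :: tl).filter (fun p => decide (level < p.1))
            = (d, w) :: tl.filter (fun p => decide (level < p.1)) := by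
          simp only [List.filter_cons]
          rw [if_pos (by simpa using hlt)]
        rw [hfil]
        simp only [List.map_cons, List.sum_cons]
        ring

-- ===== VERDICT =====
theorem spend_time_spec : Claim_equal_spend_time := by
  intro diffs times level _ hpre
  unfold Spec_spend_time spend_time
  simp only [spend_time_alt]
  rw [spend_time_key diffs times level diffs.length le_rfl hpre 0,
    PySem.List.slice_to_natCast]
  set f : Int → Int × Int := fun i =>
    ((PySem.List.pyGet? diffs i).getD 0,
     (PySem.List.pyGet? times (i - 1)).getD 0 + (PySem.List.pyGet? times i).getD 0) with hf
  set rng := PySem.List.pyRange 0 (diffs.length : Int) 1 with hrng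
  have hsortpw : ((PySem.List.sorted (rng.map f) (fun p => p.1) false).reverse).Pairwise
      (fun a b : Int × Int => b.1 ≤ a.1) := by
    rw [List.pairwise_reverse]
    exact PySem.List.sorted_pairwise (rng.map f) (fun p => p.1)
  rw [pvPenaltyLoop_eq_filter_sum level _ hsortpw]
  have hperm : ((PySem.List.sorted (rng.map f) (fun p => p.1) false).reverse).Perm (rng.map f) :=
    (List.reverse_perm _).trans (PySem.List.sorted_perm (rng.map f) (fun p => p.1) false)
  have hsum :
      ((((PySem.List.sorted (rng.map f) (fun p => p.1) false).reverse).filter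
          (fun p => level < p.1)).map (fun p => p.2 * (p.1 - level))).sum
      = (((rng.map f).filter (fun p => level < p.1)).map (fun p => p.2 * (p.1 - level))).sum :=
    List.Perm.sum_eq (List.Perm.map _ (List.Perm.filter _ hperm))
  rw [hsum, List.filter_map, List.map_map]
  have hcongr :
      ((rng.filter ((fun p : Int × Int => decide (level < p.1)) ∘ f)).map
          ((fun p : Int × Int => p.2 * (p.1 - level)) ∘ f)).sum
      = ((rng.filter (fun i => level < (PySem.List.pyGet? diffs i).getD 0)).map
          (fun i => ((PySem.List.pyGet? times (i - 1)).getD 0 + (PySem.List.pyGet? times i).getD 0)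
                      * ((PySem.List.pyGet? diffs i).getD 0 - level))).sum := by
    simp only [Function.comp_def, hf]
  rw [hcongr]
  ring
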